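-- pv_equiv track=rewrite | github.com/HayotbekAbdulazizov/PythonProjects | anton.py | ant
-- ===== SOURCE A (Python) =====
-- def ant(item):
--     result = ''
--     word = 'anton'
--     if len(item) >= len(word):
--         for i in word:
--             for x in item:
--                 if x == i:
--                     result += x
--     return result
-- ===== SOURCE B (Python) =====
-- def ant(item):
--     word = 'anton'
--     if len(item) < len(word):
--         return ''
--     a = n = t = o = ''
--     for x in item:
--         if x == 'a':
--             a += x
--         elif x == 'n':
--             n += x
--         elif x == 't':
--             t += x
--         elif x == 'o':
--             o += x
--     return a + n + t + o + n
-- ===== Notes on version B (the rewrite author's own statement) =====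
-- stated objective: faster
-- what changed: Single pass over item routing each char into one of four group accumulators, returned by the closed-form concatenation a+n+t+o+n (the n-group reused for the duplicated letter), instead of A's one full scan of item per character of the target word.
import Mathlib
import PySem

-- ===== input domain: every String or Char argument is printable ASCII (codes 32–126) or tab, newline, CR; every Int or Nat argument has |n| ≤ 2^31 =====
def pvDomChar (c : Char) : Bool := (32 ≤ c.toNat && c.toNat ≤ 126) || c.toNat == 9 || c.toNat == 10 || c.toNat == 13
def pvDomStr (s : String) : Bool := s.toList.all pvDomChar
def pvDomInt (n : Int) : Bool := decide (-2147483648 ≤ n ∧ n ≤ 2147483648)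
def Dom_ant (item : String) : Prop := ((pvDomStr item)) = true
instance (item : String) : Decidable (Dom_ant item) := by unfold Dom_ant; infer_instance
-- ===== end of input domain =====

-- B makes ONE pass over item, routing each char into one of four group accumulators,
-- and returns the closed-form concatenation a+n+t+o+n; objective: faster (one pass instead of five scans).

-- ===== PORT A =====
-- result is accumulated as a List Char (Python's string +=), wrapped to String at the end.
def ant (item : String) : String :=
  let result : List Char := []
  let word := "anton"
  let result :=
    if PySem.Str.len word ≤ PySem.Str.len item then
      word.toList.foldl (fun result i =>
        item.toList.foldl (fun result x => if x == i then result ++ [x] else result) result) result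
    else result
  String.ofList result

-- ===== PORT B =====
-- the four accumulators of Source B's single loop are a 4-tuple state; the final return is a+n+t+o+n.
def ant_alt (item : String) : String :=
  let word := "anton"
  if PySem.Str.len item < PySem.Str.len word then String.ofList []
  else
    let s := item.toList.foldl
      (fun (s : List Char × List Char × List Char × List Char) x =>
        if x == 'a' then (s.1 ++ [x], s.2.1, s.2.2.1, s.2.2.2)
        else if x == 'n' then (s.1, s.2.1 ++ [x], s.2.2.1, s.2.2.2)
        else if x == 't' then (s.1, s.2.1, s.2.2.1 ++ [x], s.2.2.2)
        else if x == 'o' then (s.1, s.2.1, s.2.2.1, s.2.2.2 ++ [x])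
        else s)
      ([], [], [], [])
    let (a, n, t, o) := s
    String.ofList (a ++ n ++ t ++ o ++ n)

-- ===== PRECONDITION & SPEC =====
def Spec_ant (item : String) (out : String) : Prop := out = ant_alt item
instance (item : String) (out : String) : Decidable (Spec_ant item out) := by unfold Spec_ant; infer_instance

-- ===== CLAIM (what is proved, stated in full; the proofs are below) =====
def Claim_equal_ant : Prop := ∀ (item : String), Dom_ant item → Spec_ant item (ant item)

-- ===== LEMMAS AND PROOFS =====

-- A's inner loop over item appends exactly the chars of item equal to i, in order
theorem pv_inner (xs : List Char) (i : Char) (r : List Char) :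
    xs.foldl (fun r x => if x == i then r ++ [x] else r) r
      = r ++ xs.filter (· == i) := by
  induction xs generalizing r with
  | nil => simp
  | cons x xs ih =>
    simp only [List.foldl_cons, List.filter_cons]
    simp only [beq_iff_eq] at ih
    by_cases h : x = i
    · subst h; simp [ih]
    · simp [h, beq_iff_eq, ih]

-- B's single pass yields the four filtered sublists
theorem pv_fold (xs : List Char) (a n t o : List Char) :
    xs.foldl
      (fun (s : List Char × List Char × List Char × List Char) x =>
        if x == 'a' then (s.1 ++ [x], s.2.1, s.2.2.1, s.2.2.2)
        else if x == 'n' then (s.1, s.2.1 ++ [x], s.2.2.1, s.2.2.2)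
        else if x == 't' then (s.1, s.2.1, s.2.2.1 ++ [x], s.2.2.2)
        else if x == 'o' then (s.1, s.2.1, s.2.2.1, s.2.2.2 ++ [x])
        else s)
      (a, n, t, o)
      = (a ++ xs.filter (· == 'a'), n ++ xs.filter (· == 'n'),
         t ++ xs.filter (· == 't'), o ++ xs.filter (· == 'o')) := by
  induction xs generalizing a n t o with
  | nil => simp
  | cons x xs ih =>
    simp only [List.foldl_cons, List.filter_cons]
    simp only [beq_iff_eq, Prod.mk.eta] at ih
    by_cases ha : x = 'a'
    · subst ha; simp [ih]
    · by_cases hn : x = 'n'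
      · subst hn; simp [ih]
      · by_cases ht : x = 't'
        · subst ht; simp [ha, hn, ih]
        · by_cases ho : x = 'o'
          · subst ho; simp [ha, hn, ht, ih]
          · simp [ha, hn, ht, ho, ih]

-- ===== VERDICT (by name: the statement is the Claim_ definition above) =====
theorem ant_spec : Claim_equal_ant := by
  intro item _
  unfold Spec_ant ant ant_alt
  by_cases h : PySem.Str.len "anton" ≤ PySem.Str.len item
  · have h' : ¬ PySem.Str.len item < PySem.Str.len "anton" := not_lt.mpr h
    simp only [if_pos h, if_neg h', pv_fold]
    refine congrArg String.ofList ?_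
    have : ("anton".toList) = ['a', 'n', 't', 'o', 'n'] := by decide
    rw [this]
    simp only [List.foldl_cons, List.foldl_nil, pv_inner]
    simp
  · have h' : PySem.Str.len item < PySem.Str.len "anton" := not_le.mp h
    simp only [if_neg h, if_pos h']
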